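-- pv_equiv track=rewrite | github.com/evaleval/every_eval_ever | utils/hle/adapter.py | _find_enclosing_array_start
-- ===== SOURCE A (Python) =====
-- def _find_enclosing_array_start(text: str, idx: int) -> int:
--     depth = 0
--     for i in range(idx, -1, -1):
--         if text[i] == ']':
--             depth += 1
--         elif text[i] == '[':
--             if depth == 0:
--                 return i
--             depth -= 1
--     raise ValueError('Unmatched array bracket while parsing RSC chunk.')
-- ===== SOURCE B (Python) =====
-- def _find_enclosing_array_start(text: str, idx: int) -> int:
--     stack = []
--     for i in range(0, idx + 1):
--         c = text[i]
--         if c == '[':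
--             stack.append(i)
--         elif c == ']' and stack:
--             stack.pop()
--     if stack:
--         return stack[-1]
--     raise ValueError('Unmatched array bracket while parsing RSC chunk.')
-- ===== Notes on version B (the rewrite author's own statement) =====
-- stated objective: alternative
-- what changed: Replaced the backward scan with a depth counter and early return by a single forward scan over text[0..idx] that maintains a stack of open-bracket positions and returns the stack top at the end.
import Mathlib
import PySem

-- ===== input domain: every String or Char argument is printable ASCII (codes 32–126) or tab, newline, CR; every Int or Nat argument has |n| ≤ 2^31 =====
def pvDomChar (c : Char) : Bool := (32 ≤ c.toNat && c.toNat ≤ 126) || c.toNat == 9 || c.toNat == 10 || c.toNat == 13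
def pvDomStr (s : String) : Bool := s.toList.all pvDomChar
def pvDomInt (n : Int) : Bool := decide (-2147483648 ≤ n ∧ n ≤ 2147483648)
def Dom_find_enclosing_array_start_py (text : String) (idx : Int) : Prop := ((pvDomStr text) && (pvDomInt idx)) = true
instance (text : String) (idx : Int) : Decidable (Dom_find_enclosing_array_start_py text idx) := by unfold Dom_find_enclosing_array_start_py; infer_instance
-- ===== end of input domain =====

-- B replaces A's backward depth-counting scan (with early return) by a forward scan that
-- maintains a stack of '[' positions and returns the stack top at the end: an alternative
-- algorithm of the same cost. Equivalence is about the return value on non-raising inputs.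

-- ===== PORT A =====
-- A's loop: for i in range(idx, -1, -1); none = fell through (ValueError) or text[i] IndexError.
def pvAGo (cs : List Char) : List Int → Int → Option Int
  | [], _ => none
  | i :: rest, depth =>
    match PySem.List.pyGet? cs i with
    | none => none
    | some c =>
      if c = ']' then pvAGo cs rest (depth + 1)
      else if c = '[' then (if depth = 0 then some i else pvAGo cs rest (depth - 1))
      else pvAGo cs rest depth

def find_enclosing_array_start_py (text : String) (idx : Int) : Int :=
  (pvAGo text.toList (PySem.List.pyRange idx (-1) (-1)) 0).getD 0

-- ===== PORT B =====
-- B's loop: for i in range(0, idx + 1), stack kept TOP-FIRST (python append ↔ cons,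
-- pop ↔ tail, stack[-1] ↔ head); none = text[i] IndexError, some [] = ValueError.
def pvBGo (cs : List Char) : List Int → List Int → Option (List Int)
  | [], st => some st
  | i :: rest, st =>
    match PySem.List.pyGet? cs i with
    | none => none
    | some c =>
      if c = '[' then pvBGo cs rest (i :: st)
      else if c = ']' ∧ st ≠ [] then pvBGo cs rest st.tail
      else pvBGo cs rest st

def find_enclosing_array_start_py_alt (text : String) (idx : Int) : Int :=
  match pvBGo text.toList (PySem.List.pyRange 0 (idx + 1) 1) [] with
  | some (t :: _) => t
  | _ => 0

-- ===== PRECONDITION & SPEC =====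
-- Pre_ excludes exactly the inputs where the Python A raises: IndexError when idx is not a
-- valid nonnegative index of text (a negative idx makes the range empty and also raises),
-- and ValueError when no suffix of text[0..idx] contains more '[' than ']' (no enclosing
-- open bracket); B raises the same exceptions there.
def Pre_find_enclosing_array_start_py (text : String) (idx : Int) : Prop :=
  0 ≤ idx ∧ idx < (text.toList.length : Int) ∧
  ∃ j ∈ List.range (idx.toNat + 1),
    ((text.toList.take (idx.toNat + 1)).drop j).count '[' >
    ((text.toList.take (idx.toNat + 1)).drop j).count ']'
instance (text : String) (idx : Int) : Decidable (Pre_find_enclosing_array_start_py text idx) := by unfold Pre_find_enclosing_array_start_py; infer_instance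

def pvWitness_find_enclosing_array_start_py : String × Int := ("a[b", 2)

def Spec_find_enclosing_array_start_py (text : String) (idx : Int) (out : Int) : Prop := out = find_enclosing_array_start_py_alt text idx
instance (text : String) (idx : Int) (out : Int) : Decidable (Spec_find_enclosing_array_start_py text idx out) := by unfold Spec_find_enclosing_array_start_py; infer_instance

-- ===== CLAIM (what is proved, stated in full; the proofs are below) =====
def Claim_equal_find_enclosing_array_start_py : Prop := ∀ (text : String) (idx : Int), Dom_find_enclosing_array_start_py text idx → Pre_find_enclosing_array_start_py text idx → Spec_find_enclosing_array_start_py text idx (find_enclosing_array_start_py text idx)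

-- ===== LEMMAS AND PROOFS =====

-- B's scan splits over an append of index lists.
theorem pvBGo_append (cs : List Char) (xs ys : List Int) (st : List Int) :
    pvBGo cs (xs ++ ys) st = (pvBGo cs xs st).bind (fun st' => pvBGo cs ys st') := by
  induction xs generalizing st with
  | nil => simp [pvBGo]
  | cons i rest ih =>
    simp only [List.cons_append, pvBGo]
    cases PySem.List.pyGet? cs i with
    | none => rfl
    | some c =>
      by_cases h1 : c = '['
      · simp [h1, ih]
      · by_cases h2 : c = ']' ∧ st ≠ [] <;> simp [h1, h2, ih]

-- B's scan returns some stack when every index in the list is in range.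
theorem pvBGo_some (cs : List Char) (js : List Int) (st : List Int)
    (h : ∀ j ∈ js, (PySem.List.pyGet? cs j).isSome) : ∃ st', pvBGo cs js st = some st' := by
  induction js generalizing st with
  | nil => exact ⟨st, rfl⟩
  | cons i rest ih =>
    have hi := h i (List.mem_cons_self ..)
    cases hg : PySem.List.pyGet? cs i with
    | none => rw [hg] at hi; simp at hi
    | some c =>
      have hrest : ∀ j ∈ rest, (PySem.List.pyGet? cs j).isSome :=
        fun j hj => h j (List.mem_cons_of_mem _ hj)
      simp only [pvBGo, hg]
      by_cases h1 : c = '['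
      · simp [h1]; exact ih _ hrest
      · by_cases h2 : c = ']' ∧ st ≠ [] <;> simp [h1, h2] <;> exact ih _ hrest

-- Every index of range(0, k+1) is a valid index of cs when k < len cs.
theorem pvValid (cs : List Char) (k : Nat) (hk : k < cs.length) :
    ∀ j ∈ PySem.List.pyRange 0 ((k : Int) + 1) 1, (PySem.List.pyGet? cs j).isSome := by
  intro j hj
  rcases PySem.List.mem_pyRange_one.mp hj with ⟨h0, h1⟩
  rw [PySem.List.pyGet?_of_nonneg_of_lt cs h0 (by omega)]
  have : j.toNat < cs.length := by omega
  simp [List.getElem?_eq_getElem this]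

-- Core invariant: A's backward scan at depth d returns the d-th element (top-first) of the
-- stack B's forward scan has built over the same prefix text[0..k].
theorem pvA_eq_stack_get (cs : List Char) :
    ∀ (k : Nat), k < cs.length → ∀ d : Int, 0 ≤ d →
      pvAGo cs (PySem.List.pyRange (k : Int) (-1) (-1)) d
        = (pvBGo cs (PySem.List.pyRange 0 ((k : Int) + 1) 1) []).bind (fun st => st[d.toNat]?) := by
  intro k
  induction k with
  | zero =>
    intro hk d hd
    have hA : PySem.List.pyRange (0 : Int) (-1) (-1) = [0] := by
      rw [PySem.List.pyRange_neg_one_cons (by norm_num)]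
      norm_num [PySem.List.pyRange_neg_one_eq_nil le_rfl]
    have hB : PySem.List.pyRange (0 : Int) (0 + 1) 1 = [0] := PySem.List.pyRange_one_singleton 0
    have hg : PySem.List.pyGet? cs (0 : Int) = some cs[0] := by
      rw [show (0:Int) = ((0:Nat):Int) by norm_num, PySem.List.pyGet?_natCast]
      simp [List.getElem?_eq_getElem hk]
    simp only [Nat.cast_zero, hA, hB]
    simp only [pvAGo, pvBGo, hg]
    by_cases h1 : cs[0] = ']'
    · simp [h1]
    · by_cases h2 : cs[0] = '['
      · by_cases hd0 : d = 0
        · simp [h2, hd0]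
        · have hdt : d.toNat ≠ 0 := by omega
          simp [h2, hd0, hdt]
      · simp [h1, h2]
  | succ k ih =>
    intro hk d hd
    have hk' : k < cs.length := Nat.lt_of_succ_lt hk
    obtain ⟨st, hst⟩ := pvBGo_some cs _ [] (pvValid cs k hk')
    have ihd : ∀ d' : Int, 0 ≤ d' →
        pvAGo cs (PySem.List.pyRange (k : Int) (-1) (-1)) d' = st[d'.toNat]? := by
      intro d' hd'
      rw [ih hk' d' hd', hst]
      rfl
    have hA : PySem.List.pyRange ((k + 1 : Nat) : Int) (-1) (-1)
        = ((k : Int) + 1) :: PySem.List.pyRange (k : Int) (-1) (-1) := by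
      rw [Nat.cast_add, Nat.cast_one, PySem.List.pyRange_neg_one_cons (by omega)]
      norm_num
    have hB : PySem.List.pyRange 0 (((k + 1 : Nat) : Int) + 1) 1
        = PySem.List.pyRange 0 ((k : Int) + 1) 1 ++ [(k : Int) + 1] := by
      push_cast
      exact PySem.List.pyRange_one_succ_right (by omega)
    have hg : PySem.List.pyGet? cs ((k : Int) + 1) = some cs[k + 1] := by
      rw [show (k : Int) + 1 = ((k + 1 : Nat) : Int) by push_cast; ring, PySem.List.pyGet?_natCast]
      simp [List.getElem?_eq_getElem hk]
    rw [hA, hB, pvBGo_append, hst]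
    dsimp only [Option.bind]
    simp only [pvAGo, pvBGo, hg]
    by_cases h1 : cs[k + 1] = ']'
    · have h2 : ¬ cs[k + 1] = '[' := by simp [h1]
      by_cases hst0 : st = []
      · subst hst0
        simp [h1, ihd (d + 1) (by omega)]
      · have hdt : (d + 1).toNat = d.toNat + 1 := by omega
        simp [h1, hst0, ihd (d + 1) (by omega), hdt, List.getElem?_tail]
    · by_cases h2 : cs[k + 1] = '['
      · by_cases hd0 : d = 0
        · simp [h2, hd0]
        · have hdt : d.toNat = (d - 1).toNat + 1 := by omega
          rw [hdt]
          simp [h2, hd0, ihd (d - 1) (by omega)]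
      · simp [h1, h2, ihd d hd]

-- ===== VERDICT (by name: the statement is the Claim_ definition above) =====
theorem find_enclosing_array_start_py_spec : Claim_equal_find_enclosing_array_start_py := by
  unfold Claim_equal_find_enclosing_array_start_py
  intro text idx _ hpre
  unfold Spec_find_enclosing_array_start_py
  obtain ⟨h0, hlen, -⟩ := hpre
  unfold find_enclosing_array_start_py find_enclosing_array_start_py_alt
  have hidx : idx = ((idx.toNat : Nat) : Int) := (Int.toNat_of_nonneg h0).symm
  have hk : idx.toNat < text.toList.length := by omega
  rw [hidx, pvA_eq_stack_get text.toList idx.toNat hk 0 le_rfl]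
  obtain ⟨st, hst⟩ := pvBGo_some text.toList _ [] (pvValid text.toList idx.toNat hk)
  rw [hst]
  cases st with
  | nil => simp
  | cons t rest => simp
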